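-- pv_equiv track=rewrite | github.com/pangay/C2_SeqRL | env/env.py | check_conflict
-- ===== SOURCE A (Python) =====
-- from collections import defaultdict
--
-- def check_conflict(sequence, substring_length, num_colors):
--     """检查序列是否有冲突"""
--     L = len(sequence)
--     c = num_colors
--     hist_map = defaultdict(list)
--     conflicts_exist = False
--
--     for i in range(L - substring_length + 1):
--         window = sequence[i:i + substring_length]
--         hist = tuple(window.count(v) for v in range(c))
--         if hist in hist_map:
--             conflicts_exist = True
--             break
--         hist_map[hist].append(i)
--     return not conflicts_exist  # True 表示没有冲突，即合法
-- ===== SOURCE B (Python) =====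
-- from collections import defaultdict
--
-- def check_conflict(sequence, substring_length, num_colors):
--     L = len(sequence)
--     n = L - substring_length + 1  # number of windows
--     if n <= 1:
--         return True  # at most one window: no conflict possible
--     if substring_length <= 0:
--         return False  # every window is empty, so histograms repeat
--     counts = defaultdict(int)
--     for v in sequence[:substring_length]:
--         counts[v] += 1
--     seen = {tuple(counts[v] for v in range(num_colors))}
--     for i in range(1, n):
--         counts[sequence[i - 1]] -= 1
--         counts[sequence[i + substring_length - 1]] += 1
--         t = tuple(counts[v] for v in range(num_colors))
--         if t in seen:
--             return False
--         seen.add(t)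
--     return True
-- ===== Notes on version B (the rewrite author's own statement) =====
-- stated objective: faster
-- what changed: B replaces A's per-window recount (counting every color over every window from scratch) with a single sliding-window histogram updated in O(1) per step, testing each window's count-tuple against a set of seen tuples.
import Mathlib
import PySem

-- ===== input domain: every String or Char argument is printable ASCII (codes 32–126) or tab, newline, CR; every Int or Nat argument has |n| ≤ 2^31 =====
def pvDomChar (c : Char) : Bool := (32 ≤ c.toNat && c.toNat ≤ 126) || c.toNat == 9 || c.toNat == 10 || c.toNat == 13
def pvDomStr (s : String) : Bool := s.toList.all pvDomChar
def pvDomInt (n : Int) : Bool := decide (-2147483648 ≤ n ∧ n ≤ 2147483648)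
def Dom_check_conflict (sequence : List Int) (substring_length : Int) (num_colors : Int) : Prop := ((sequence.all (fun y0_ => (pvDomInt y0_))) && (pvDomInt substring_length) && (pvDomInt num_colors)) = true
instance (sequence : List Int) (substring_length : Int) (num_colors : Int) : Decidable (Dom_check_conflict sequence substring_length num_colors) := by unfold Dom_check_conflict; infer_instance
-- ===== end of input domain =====

-- B replaces A's per-window recount of every color with an incremental sliding-window
-- histogram plus a seen-set (objective: faster; return value only, no mutation involved).

-- ===== PORT A =====
-- hist = tuple(window.count(v) for v in range(c))
def pvHist (window : List Int) (c : Int) : List Int :=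
  (PySem.List.pyRange 0 c 1).map (fun v => (PySem.List.count window v : Int))

-- the for-loop of A over i in range(L - substring_length + 1), iterated lazily as Python
-- does (fuel = number of remaining iterations, i the current index; break = return true)
def pvLoopA (sequence : List Int) (sl c : Int) :
    Nat → Int → PySem.Dict (List Int) (List Int) → Bool
  | 0, _, _ => false
  | fuel + 1, i, m =>
    let hist := pvHist (PySem.List.slice sequence (some i) (some (i + sl))) c
    if m.contains hist then true
    else pvLoopA sequence sl c fuel (i + 1) (m.modify hist [] (fun l => l ++ [i]))

def check_conflict (sequence : List Int) (substring_length : Int) (num_colors : Int) : Bool :=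
  !(pvLoopA sequence substring_length num_colors
      ((sequence.length : Int) - substring_length + 1).toNat 0 PySem.Dict.empty)

-- ===== PORT B =====
-- t = tuple(counts[v] for v in range(num_colors))
def pvTuple (d : PySem.Dict Int Int) (c : Int) : List Int :=
  (PySem.List.pyRange 0 c 1).map (fun v => d.getD v 0)

-- the sliding loop of B: drop sequence[i-1], add sequence[i+sl-1], test the tuple
def pvLoopB (sequence : List Int) (sl c : Int) :
    List Int → PySem.Dict Int Int → PySem.Set (List Int) → Bool
  | [], _, _ => true
  | i :: rest, d, seen =>
    let d1 := ((d.modify (PySem.List.pyGetD sequence (i - 1) 0) 0 (fun x => x - 1)).modify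
                 (PySem.List.pyGetD sequence (i + sl - 1) 0) 0 (fun x => x + 1))
    let t := pvTuple d1 c
    if PySem.Set.contains seen t then false
    else pvLoopB sequence sl c rest d1 (PySem.Set.add seen t)

def check_conflict_alt (sequence : List Int) (substring_length : Int) (num_colors : Int) : Bool :=
  let n : Int := (sequence.length : Int) - substring_length + 1
  if n ≤ 1 then true
  else if substring_length ≤ 0 then false
  else
    let d0 := (PySem.List.slice sequence none (some substring_length)).foldl
                (fun d v => d.modify v 0 (fun x => x + 1)) PySem.Dict.empty
    pvLoopB sequence substring_length num_colors
      (PySem.List.pyRange 1 n 1) d0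
      (PySem.Set.add PySem.Set.empty (pvTuple d0 num_colors))

-- ===== PRECONDITION & SPEC =====
def Spec_check_conflict (sequence : List Int) (substring_length : Int) (num_colors : Int) (out : Bool) : Prop := out = check_conflict_alt sequence substring_length num_colors
instance (sequence : List Int) (substring_length : Int) (num_colors : Int) (out : Bool) : Decidable (Spec_check_conflict sequence substring_length num_colors out) := by unfold Spec_check_conflict; infer_instance

-- ===== CLAIM (what is proved, stated in full; the proofs are below) =====
def Claim_equal_check_conflict : Prop := ∀ (sequence : List Int) (substring_length : Int) (num_colors : Int), Dom_check_conflict sequence substring_length num_colors → Spec_check_conflict sequence substring_length num_colors (check_conflict sequence substring_length num_colors)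

-- ===== LEMMAS AND PROOFS =====

-- the histogram of window i (shared vocabulary of the proofs)
def pvH (seq : List Int) (sl c i : Int) : List Int :=
  pvHist (PySem.List.slice seq (some i) (some (i + sl))) c

-- abstract duplicate scanner both loops reduce to
def pvDup : List (List Int) → List (List Int) → Bool
  | [], _ => false
  | h :: t, seen => if h ∈ seen then true else pvDup t (h :: seen)

lemma pvDup_congr : ∀ (l s1 s2 : List (List Int)), (∀ x, x ∈ s1 ↔ x ∈ s2) →
    pvDup l s1 = pvDup l s2 := by
  intro l
  induction l with
  | nil => intro _ _ _; rfl
  | cons h t ih =>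
    intro s1 s2 hs
    simp only [pvDup]
    by_cases hm : h ∈ s1
    · rw [if_pos hm, if_pos ((hs h).1 hm)]
    · rw [if_neg hm, if_neg (fun hc => hm ((hs h).2 hc))]
      exact ih _ _ (by intro x; simp [hs x])

lemma pvDup_false_iff : ∀ (l s : List (List Int)),
    pvDup l s = false ↔ l.Nodup ∧ ∀ x ∈ l, x ∉ s := by
  intro l
  induction l with
  | nil => intro s; simp [pvDup]
  | cons h t ih =>
    intro s
    simp only [pvDup]
    by_cases hm : h ∈ s
    · simp [hm]
    · rw [if_neg hm, ih]
      simp only [List.nodup_cons, List.mem_cons]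
      constructor
      · rintro ⟨hnd, hall⟩
        refine ⟨⟨fun hht => hall h hht (Or.inl rfl), hnd⟩, ?_⟩
        rintro x (rfl | hx)
        · exact hm
        · exact fun hxs => hall x hx (Or.inr hxs)
      · rintro ⟨⟨hht, hnd⟩, hall⟩
        refine ⟨hnd, ?_⟩
        intro x hx hxs
        rcases hxs with rfl | hxs
        · exact hht hx
        · exact hall x (Or.inr hx) hxs

lemma pvLoopA_eq (seq : List Int) (sl c : Int) :
    ∀ (fuel : Nat) (i : Int) (m : PySem.Dict (List Int) (List Int)),
    pvLoopA seq sl c fuel i m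
      = pvDup ((PySem.List.pyRange i (i + fuel) 1).map (pvH seq sl c)) m.keys := by
  intro fuel
  induction fuel with
  | zero =>
    intro i m
    rw [show i + ((0:Nat):Int) = i from by push_cast; ring, PySem.List.pyRange_one_eq_nil le_rfl]
    rfl
  | succ fuel ih =>
    intro i m
    rw [PySem.List.pyRange_one_cons (by push_cast; omega : i < i + ((fuel+1 : Nat) : Int)),
      show i + ((fuel+1 : Nat) : Int) = (i + 1) + ((fuel : Nat) : Int) from by push_cast; ring]
    rw [List.map_cons]
    simp only [pvLoopA, pvDup, pvH]
    rw [PySem.Dict.contains_eq_decide_mem_keys]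
    by_cases hm : pvHist (PySem.List.slice seq (some i) (some (i + sl))) c ∈ m.keys
    · simp [hm]
    · rw [if_neg (by simp [hm]), if_neg hm, ih]
      apply pvDup_congr
      intro x
      rw [PySem.Dict.keys_modify, PySem.Dict.mem_keys_insert]
      exact List.mem_cons.symm

-- A returns true iff the histograms of all windows are pairwise distinct
lemma checkA_iff (seq : List Int) (sl c : Int) :
    check_conflict seq sl c = true ↔
      ((PySem.List.pyRange 0 ((seq.length : Int) - sl + 1) 1).map (pvH seq sl c)).Nodup := by
  unfold check_conflict
  rw [pvLoopA_eq]
  have hr : PySem.List.pyRange 0 (0 + ((((seq.length : Int) - sl + 1).toNat : Nat) : Int)) 1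
      = PySem.List.pyRange 0 ((seq.length : Int) - sl + 1) 1 := by
    by_cases h : 0 ≤ (seq.length : Int) - sl + 1
    · congr 1
      omega
    · rw [PySem.List.pyRange_one_eq_nil (by omega), PySem.List.pyRange_one_eq_nil (by omega)]
  rw [hr]
  simp only [PySem.Dict.keys_empty, Bool.not_eq_eq_eq_not, Bool.not_true]
  rw [pvDup_false_iff]
  simp

-- Set.contains is membership
lemma pvSetContains (s : PySem.Set (List Int)) (t : List Int) :
    PySem.Set.contains s t = true ↔ t ∈ s := by
  simp [PySem.Set.contains]

-- sliding step of the counts, list-level (window length m = k+1)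
lemma count_window_step (seq : List Int) (j k : Nat) (hjk : j + (k + 1) < seq.length) (v : Int) :
    (List.count v ((seq.drop (j+1)).take (k+1)) : Int)
      = (List.count v ((seq.drop j).take (k+1)) : Int)
        - (if v = seq[j]'(by omega) then 1 else 0)
        + (if v = seq[j + (k+1)]'(by omega) then 1 else 0) := by
  have hj : j < seq.length := by omega
  have hjk1 : j + 1 + k < seq.length := by omega
  have h1 : (seq.drop j).take (k+1) = seq[j] :: (seq.drop (j+1)).take k := by
    rw [List.drop_eq_getElem_cons hj, List.take_succ_cons]
  have hidx : j + 1 + k = j + (k + 1) := by omega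
  have h2 : (seq.drop (j+1)).take (k+1)
      = (seq.drop (j+1)).take k ++ [seq[j + (k+1)]'(by omega)] := by
    rw [List.take_add_one, List.getElem?_drop, List.getElem?_eq_getElem (by omega : j + 1 + k < seq.length)]
    simp only [Option.toList_some, show j + 1 + k = j + (k + 1) from by omega]
  rw [h1, h2]
  simp only [List.count_cons, List.count_append]
  push_cast
  split_ifs <;> simp_all

-- empty slices for the degenerate substring_length ≤ 0 case
lemma slice_empty_of_clamp_le (seq : List Int) (a b : Int)
    (h : PySem.List.clampIdx seq.length b ≤ PySem.List.clampIdx seq.length a) :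
    PySem.List.slice seq (some a) (some b) = ([] : List Int) := by
  have hl := PySem.List.length_slice seq a b
  have hlen : (PySem.List.slice seq (some a) (some b)).length = 0 := by omega
  exact List.eq_nil_of_length_eq_zero hlen

lemma clampIdx_of_nonneg (n : Nat) (k : Int) (hk : 0 ≤ k) :
    PySem.List.clampIdx n k = min k.toNat n := by
  have h : k = ((k.toNat : Nat) : Int) := by omega
  rw [h, PySem.List.clampIdx_natCast]
  omega

-- every window starting at or past length - 1 is empty when substring_length ≤ 0
lemma window_nil_of_late (seq : List Int) (sl : Int) (hsl : sl ≤ 0) (i : Int)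
    (hi0 : 0 ≤ i) (hi : (seq.length : Int) - 1 ≤ i) :
    PySem.List.slice seq (some i) (some (i + sl)) = ([] : List Int) := by
  apply slice_empty_of_clamp_le
  rw [clampIdx_of_nonneg _ i hi0]
  by_cases hb : 0 ≤ i + sl
  · rw [clampIdx_of_nonneg _ _ hb]; omega
  · have hk : 0 < (-(i + sl)).toNat := by omega
    have hbe : i + sl = -(((-(i + sl)).toNat : Nat) : Int) := by omega
    rw [hbe, PySem.List.clampIdx_neg_natCast _ _ hk]
    omega

-- a dict whose counts agree with a window yields that window's histogram tuple
lemma tuple_eq_H (seq : List Int) (sl c i : Int) (d : PySem.Dict Int Int)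
    (h : ∀ v, d.getD v 0 = (List.count v (PySem.List.slice seq (some i) (some (i + sl))) : Int)) :
    pvTuple d c = pvH seq sl c i := by
  unfold pvTuple pvH pvHist
  apply List.map_congr_left
  intro v _
  rw [h v, PySem.List.count_eq]

-- main loop invariant for B
lemma pvLoopB_spec (seq : List Int) (sl c : Int) (hsl : 1 ≤ sl) :
    ∀ (k : Nat) (i : Int) (d : PySem.Dict Int Int) (seen : PySem.Set (List Int)),
    (((seq.length : Int) - sl + 1) - i).toNat = k →
    1 ≤ i → i ≤ (seq.length : Int) - sl + 1 →
    (∀ v, d.getD v 0 = (List.count v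
        (PySem.List.slice seq (some (i-1)) (some (i-1+sl))) : Int)) →
    (∀ t, t ∈ seen ↔ t ∈ (PySem.List.pyRange 0 i 1).map (pvH seq sl c)) →
    pvLoopB seq sl c (PySem.List.pyRange i ((seq.length : Int) - sl + 1) 1) d seen
      = ! pvDup ((PySem.List.pyRange i ((seq.length : Int) - sl + 1) 1).map (pvH seq sl c))
                ((PySem.List.pyRange 0 i 1).map (pvH seq sl c)) := by
  intro k
  induction k with
  | zero =>
    intro i d seen h0 h1 h2 hd hseen
    have hni : (seq.length : Int) - sl + 1 ≤ i := by omega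
    rw [PySem.List.pyRange_one_eq_nil hni]
    simp [pvLoopB, pvDup]
  | succ k ih =>
    intro i d seen h0 h1 h2 hd hseen
    have hin : i < (seq.length : Int) - sl + 1 := by omega
    rw [PySem.List.pyRange_one_cons hin]
    simp only [pvLoopB, List.map_cons, pvDup]
    obtain ⟨j, hj⟩ : ∃ j : Nat, (j : Int) = i - 1 := ⟨(i-1).toNat, by omega⟩
    obtain ⟨kk, hkk⟩ : ∃ kk : Nat, ((kk : Int) + 1) = sl := ⟨(sl-1).toNat, by omega⟩
    have hjkL : j + (kk + 1) < seq.length := by omega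
    have hjlt : j < seq.length := by omega
    have ha : PySem.List.pyGetD seq (i - 1) 0 = seq[j]'hjlt := by
      rw [← hj, PySem.List.pyGetD_natCast]
      exact List.getD_eq_getElem seq 0 hjlt
    have hb : PySem.List.pyGetD seq (i + sl - 1) 0 = seq[j + (kk + 1)]'hjkL := by
      rw [show i + sl - 1 = ((j + (kk + 1) : Nat) : Int) from by push_cast; omega,
        PySem.List.pyGetD_natCast]
      exact List.getD_eq_getElem seq 0 hjkL
    have hWprev : PySem.List.slice seq (some (i-1)) (some (i-1+sl))
        = (seq.drop j).take (kk+1) := by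
      rw [PySem.List.slice_toNat seq (by omega) (by omega),
        show (i-1).toNat = j from by omega,
        show (i-1+sl).toNat = j + (kk+1) from by omega,
        show j + (kk+1) - j = kk+1 from by omega]
    have hWi : PySem.List.slice seq (some i) (some (i+sl))
        = (seq.drop (j+1)).take (kk+1) := by
      rw [PySem.List.slice_toNat seq (by omega) (by omega),
        show i.toNat = j + 1 from by omega,
        show (i+sl).toNat = (j+1) + (kk+1) from by omega,
        show (j+1) + (kk+1) - (j+1) = kk+1 from by omega]
    have key : ∀ v, ((d.modify (PySem.List.pyGetD seq (i - 1) 0) 0 (fun x => x - 1)).modify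
                 (PySem.List.pyGetD seq (i + sl - 1) 0) 0 (fun x => x + 1)).getD v 0
        = (List.count v (PySem.List.slice seq (some i) (some (i+sl))) : Int) := by
      intro v
      simp only [PySem.Dict.getD_modify]
      rw [ha, hb, hWi, count_window_step seq j kk hjkL v, ← hWprev]
      split_ifs <;> simp_all
    have htup : pvTuple ((d.modify (PySem.List.pyGetD seq (i - 1) 0) 0 (fun x => x - 1)).modify
                 (PySem.List.pyGetD seq (i + sl - 1) 0) 0 (fun x => x + 1)) c = pvH seq sl c i :=
      tuple_eq_H seq sl c i _ key
    rw [htup]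
    by_cases hmem : pvH seq sl c i ∈ (PySem.List.pyRange 0 i 1).map (pvH seq sl c)
    · rw [if_pos ((pvSetContains seen _).2 ((hseen _).2 hmem)), if_pos hmem]
      rfl
    · rw [if_neg (fun hc => hmem ((hseen _).1 ((pvSetContains seen _).1 hc))), if_neg hmem]
      rw [ih (i+1) _ _ (by omega) (by omega) (by omega)
        (by
          intro v
          rw [show i + 1 - 1 = i from by ring]
          exact key v)
        (by
          intro t
          rw [PySem.Set.mem_add, PySem.List.pyRange_one_succ_right (by omega : (0:Int) ≤ i),
            List.map_append, List.mem_append]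
          simp only [List.map_cons, List.map_nil, List.mem_singleton]
          rw [hseen t])]
      apply congrArg
      apply pvDup_congr
      intro x
      rw [PySem.List.pyRange_one_succ_right (by omega : (0:Int) ≤ i), List.map_append,
        List.mem_append]
      simp [or_comm]

-- ===== VERDICT (by name: the statement is the Claim_ definition above) =====
theorem check_conflict_spec : Claim_equal_check_conflict := by
  intro seq sl c _
  unfold Spec_check_conflict
  simp only [check_conflict_alt]
  by_cases hn : (seq.length : Int) - sl + 1 ≤ 1
  · rw [if_pos hn]
    apply (checkA_iff seq sl c).2
    by_cases hn0 : (seq.length : Int) - sl + 1 ≤ 0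
    · rw [PySem.List.pyRange_one_eq_nil (by omega)]
      simp
    · rw [show (seq.length : Int) - sl + 1 = 0 + 1 from by omega,
        PySem.List.pyRange_one_singleton]
      simp
  · rw [if_neg hn]
    by_cases hsl : sl ≤ 0
    · rw [if_pos hsl]
      -- the last two windows are both empty, hence duplicate histograms
      have hnodup : ¬ ((PySem.List.pyRange 0 ((seq.length : Int) - sl + 1) 1).map
          (pvH seq sl c)).Nodup := by
        intro hnd
        have hn2 : (2:Int) ≤ (seq.length : Int) - sl + 1 := by omega
        have hlen : ((PySem.List.pyRange 0 ((seq.length : Int) - sl + 1) 1).map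
            (pvH seq sl c)).length = ((seq.length : Int) - sl + 1).toNat := by
          rw [List.length_map, PySem.List.length_pyRange_one]
          congr 1
          omega
        have hp : ((seq.length : Int) - sl + 1).toNat - 2
            < ((PySem.List.pyRange 0 ((seq.length : Int) - sl + 1) 1).map (pvH seq sl c)).length := by
          omega
        have hq : ((seq.length : Int) - sl + 1).toNat - 1
            < ((PySem.List.pyRange 0 ((seq.length : Int) - sl + 1) 1).map (pvH seq sl c)).length := by
          omega
        have hvp : ((PySem.List.pyRange 0 ((seq.length : Int) - sl + 1) 1).map
              (pvH seq sl c))[((seq.length : Int) - sl + 1).toNat - 2]'hp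
            = pvH seq sl c (0 + ((((seq.length : Int) - sl + 1).toNat - 2 : Nat) : Int)) := by
          rw [List.getElem_map, PySem.List.getElem_pyRange_one]
        have hvq : ((PySem.List.pyRange 0 ((seq.length : Int) - sl + 1) 1).map
              (pvH seq sl c))[((seq.length : Int) - sl + 1).toNat - 1]'hq
            = pvH seq sl c (0 + ((((seq.length : Int) - sl + 1).toNat - 1 : Nat) : Int)) := by
          rw [List.getElem_map, PySem.List.getElem_pyRange_one]
        have hWp : pvH seq sl c (0 + ((((seq.length : Int) - sl + 1).toNat - 2 : Nat) : Int))
            = pvHist [] c := by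
          unfold pvH
          rw [window_nil_of_late seq sl hsl _ (by omega) (by omega)]
        have hWq : pvH seq sl c (0 + ((((seq.length : Int) - sl + 1).toNat - 1 : Nat) : Int))
            = pvHist [] c := by
          unfold pvH
          rw [window_nil_of_late seq sl hsl _ (by omega) (by omega)]
        have heq := hvp.trans (hWp.trans (hWq.symm.trans hvq.symm))
        have hpq := (List.Nodup.getElem_inj_iff hnd).1 heq
        omega
      cases hA : check_conflict seq sl c with
      | false => rfl
      | true => exact absurd ((checkA_iff seq sl c).1 hA) hnodup
    · rw [if_neg hsl]
      -- main case: at least two windows, positive window length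
      have hd0 : ∀ v, ((PySem.List.slice seq none (some sl)).foldl
            (fun d v => d.modify v 0 (fun x => x + 1)) PySem.Dict.empty).getD v 0
          = (List.count v (PySem.List.slice seq (some 0) (some (0 + sl))) : Int) := by
        intro v
        rw [PySem.Dict.getD_foldl_modify_add_one, PySem.Dict.getD_empty,
          PySem.List.slice_zero_start]
        simp
      have ht0 : pvTuple ((PySem.List.slice seq none (some sl)).foldl
            (fun d v => d.modify v 0 (fun x => x + 1)) PySem.Dict.empty) c
          = pvH seq sl c 0 :=
        tuple_eq_H seq sl c 0 _ hd0
      have h01 : PySem.List.pyRange 0 1 1 = [(0:Int)] := by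
        simpa using PySem.List.pyRange_one_singleton (a := (0:Int))
      rw [pvLoopB_spec seq sl c (by omega) ((seq.length : Int) - sl).toNat 1 _ _
        (by omega) le_rfl (by omega)
        (by
          intro v
          rw [show (1:Int) - 1 = 0 from by ring]
          exact hd0 v)
        (by
          intro t
          rw [PySem.Set.mem_add, h01]
          simp [PySem.Set.empty, ht0])]
      unfold check_conflict
      rw [pvLoopA_eq]
      have hr : PySem.List.pyRange 0 (0 + ((((seq.length : Int) - sl + 1).toNat : Nat) : Int)) 1
          = PySem.List.pyRange 0 ((seq.length : Int) - sl + 1) 1 := by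
        congr 1
        omega
      rw [hr, PySem.List.pyRange_one_cons (by omega : (0:Int) < (seq.length : Int) - sl + 1),
        show (0:Int) + 1 = 1 from by ring]
      simp only [List.map_cons, PySem.Dict.keys_empty, h01, List.map_nil]
      simp [pvDup]
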